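-- pv_equiv track=rewrite | github.com/Mungage/Kattis | cold_puter_science/cold_puter_science.py | determine_negative_temps
-- ===== SOURCE A (Python) =====
-- def determine_negative_temps(temp_list: list) -> int:
--     number_of_temperatures = 0
--
--     for num in temp_list[1:]:
--         # Check whether the temperatures are within the given constraints
--         if num <= -1000000 or num >= 1000000:
--             # If not, return None
--             return None
--         # Check if the temperatures are below zero, in which case add one to the number_of_temperatures
--         elif num < 0:
--             number_of_temperatures += 1
--
--     return number_of_temperatures
-- ===== SOURCE B (Python) =====
-- def determine_negative_temps(temp_list: list) -> int:
--     tail = temp_list[1:]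
--     if any(n <= -1000000 or n >= 1000000 for n in tail):
--         return None
--     return sum(1 for n in tail if n < 0)
-- ===== Notes on version B (the rewrite author's own statement) =====
-- stated objective: simpler
-- what changed: Replaces the single interleaved validate-and-count loop with early return by two separate passes: an any() validity check returning None, then a sum() comprehension counting negatives.
import Mathlib
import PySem

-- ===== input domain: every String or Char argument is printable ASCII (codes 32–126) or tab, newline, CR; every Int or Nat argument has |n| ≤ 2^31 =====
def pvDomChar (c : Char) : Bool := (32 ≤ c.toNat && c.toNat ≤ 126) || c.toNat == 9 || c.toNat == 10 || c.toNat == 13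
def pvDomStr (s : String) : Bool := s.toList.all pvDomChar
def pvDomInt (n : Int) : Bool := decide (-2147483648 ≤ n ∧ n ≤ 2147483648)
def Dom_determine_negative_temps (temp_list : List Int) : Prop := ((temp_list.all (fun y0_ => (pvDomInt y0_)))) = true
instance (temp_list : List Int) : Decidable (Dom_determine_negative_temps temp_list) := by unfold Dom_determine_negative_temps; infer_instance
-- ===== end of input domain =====

-- B splits A's single interleaved validate-and-count loop into two passes (any-validity check, then count); objective: simpler.


-- ===== PORT A =====
-- loop over temp_list[1:] with early 'return None' and a running counter
def detNegLoop : List Int → Int → Option Int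
  | [], acc => some acc
  | num :: rest, acc =>
      if num ≤ -1000000 ∨ num ≥ 1000000 then none
      else if num < 0 then detNegLoop rest (acc + 1)
      else detNegLoop rest acc

def determine_negative_temps (temp_list : List Int) : Option Int :=
  detNegLoop (PySem.List.slice temp_list (some 1) none) 0

-- ===== PORT B =====
def determine_negative_temps_alt (temp_list : List Int) : Option Int :=
  let tail := PySem.List.slice temp_list (some 1) none
  if tail.any (fun n => decide (n ≤ -1000000) || decide (n ≥ 1000000)) then none
  else some ((tail.filter (fun n => decide (n < 0))).foldl (fun s _ => s + 1) 0)

-- ===== PRECONDITION & SPEC =====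
def Spec_determine_negative_temps (temp_list : List Int) (out : Option Int) : Prop := out = determine_negative_temps_alt temp_list
instance (temp_list : List Int) (out : Option Int) : Decidable (Spec_determine_negative_temps temp_list out) := by unfold Spec_determine_negative_temps; infer_instance

-- ===== CLAIM (what is proved, stated in full; the proofs are below) =====
def Claim_equal_determine_negative_temps : Prop := ∀ (temp_list : List Int), Dom_determine_negative_temps temp_list → Spec_determine_negative_temps temp_list (determine_negative_temps temp_list)

-- ===== LEMMAS AND PROOFS =====
theorem detNegLoop_eq (l : List Int) (acc : Int) :
    detNegLoop l acc =
      (if l.any (fun n => decide (n ≤ -1000000) || decide (n ≥ 1000000)) then none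
       else some (acc + (l.filter (fun n => decide (n < 0))).foldl (fun s _ => s + 1) 0)) := by
  induction l generalizing acc with
  | nil => simp [detNegLoop]
  | cons num rest ih =>
      by_cases hb : num ≤ -1000000 ∨ num ≥ 1000000
      · simp [detNegLoop, hb]
      · push_neg at hb
        have h1 : ¬ (num ≤ -1000000) := by omega
        have h2 : ¬ (num ≥ 1000000) := by omega
        by_cases hn : num < 0
        · simp [detNegLoop, h1, h2, hn, ih]
          split_ifs with h
          · rfl
          · have key : ∀ (l : List Int) (b : Int),
                l.foldl (fun s _ => s + 1) b = b + l.foldl (fun s _ => s + 1) 0 := by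
              intro l
              induction l with
              | nil => intro b; simp [List.foldl]
              | cons x xs ihx => intro b; simp only [List.foldl]; rw [ihx (b+1), ihx (0+1)]; ring
            rw [key _ 1]
            generalize (List.filter (fun n => decide (n < 0)) rest).foldl (fun s _ => s + 1) 0 = F
            ring
        · simp [detNegLoop, h1, h2, hn, ih]

-- ===== VERDICT (by name: the statement is the Claim_ definition above) =====
theorem determine_negative_temps_spec : Claim_equal_determine_negative_temps := by
  intro temp_list _
  unfold Spec_determine_negative_temps determine_negative_temps determine_negative_temps_alt
  rw [detNegLoop_eq]
  simp
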